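-- pv_equiv track=rewrite | github.com/jorgetomaylla21/INGInious-CESReS | transform_code_to_df.py | put_semicolon_last_indent
-- ===== SOURCE A (Python) =====
-- def put_semicolon_last_indent(code: str) -> str:
--     """
--     Function to automatically add a semicolon at the end of the last instruction of each indented block.
--
--     Args:
--         code: the code to be modified to add the semicolon indication.
--
--     Return:
--         the modified code.
--     """
--     # Last indentation level
--     last_indent = 0
--     # The lines of the newly constructed code
--     new_lines = []
--
--     # For each line
--     for line in code.split("\n"):
--         # We only consider the non-empty lines
--         if len(line) > 0:
--             # The indentation is the number of \t or sequence of 4 spaces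
--             pos = 0
--             while pos < len(line) and (line[pos] == " " or line[pos] == "\t"):
--                 pos += 1
--             # NOTE: lines only composed of spaces could break this part
--             indent = pos
--             # The semicolon is added at the previous line if the current line is less indented
--             if indent < last_indent:
--                 new_lines[-1] = new_lines[-1]+";"
--             # Update the set of lines and indentation
--             new_lines.append(line)
--             last_indent = indent
--     # Check if the last line should also have a ";"
--     if len(new_lines[-1]) > 0 and new_lines[-1][-1] != ";":
--         new_lines[-1] = new_lines[-1]+";"
--
--     # The new code is the new lines
--     return "\n".join(new_lines)
-- ===== SOURCE B (Python) =====
-- def put_semicolon_last_indent(code: str) -> str: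
--     """Add a semicolon at the end of the last instruction of each indented block.
--
--     Back-to-front decomposition: handle the last non-empty line first, then walk
--     the remaining lines in reverse, threading the indentation of the line BELOW
--     (a lookahead, not A's trailing state) and emitting each finished line into a
--     reversed output list; no already-emitted line is ever patched.
--     """
--     lines = [l for l in code.split("\n") if l]
--     tail = lines.pop()
--     out = [tail if tail.endswith(";") else tail + ";"]
--     below = len(tail) - len(tail.lstrip(" \t"))
--     for line in reversed(lines):
--         ind = len(line) - len(line.lstrip(" \t"))
--         out.append(line + ";" if below < ind else line)
--         below = ind
--     return "\n".join(reversed(out))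
-- ===== Notes on version B (the rewrite author's own statement) =====
-- stated objective: alternative
-- what changed: A makes one forward stateful pass that tracks the previous line's indentation and retroactively patches the already-emitted previous line, then fixes the last line after the loop; B works back-to-front: it finalises the last non-empty line first, then walks the remaining lines in reverse with the indentation of the line below as lookahead, emitting each line exactly once into a reversed output list that is reversed at the join.
import Mathlib
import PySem

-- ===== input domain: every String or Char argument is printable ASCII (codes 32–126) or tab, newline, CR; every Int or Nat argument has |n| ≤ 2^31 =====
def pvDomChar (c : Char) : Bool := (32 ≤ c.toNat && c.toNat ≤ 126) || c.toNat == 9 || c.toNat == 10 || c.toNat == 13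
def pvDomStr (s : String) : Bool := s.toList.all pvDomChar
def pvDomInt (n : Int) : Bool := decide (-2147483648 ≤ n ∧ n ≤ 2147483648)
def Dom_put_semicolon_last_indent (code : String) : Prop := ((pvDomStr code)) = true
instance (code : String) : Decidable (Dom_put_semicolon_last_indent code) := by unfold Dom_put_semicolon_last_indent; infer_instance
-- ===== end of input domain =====

-- B builds the result back-to-front: the last non-empty line is finalised first,
-- then the remaining lines are walked in reverse with the indentation of the line
-- BELOW as lookahead, each line emitted exactly once (no retro-patching as in A).

-- ===== PORT A =====

-- A's while loop: pos advances over leading ' '/'\t'; indent = pos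
def pvIndentA : List Char → Nat
  | [] => 0
  | c :: cs => if c = ' ' ∨ c = '\t' then pvIndentA cs + 1 else 0

-- new_lines is kept reversed (head = new_lines[-1]); this is `new_lines[-1] = new_lines[-1] + ";"`
def pvBumpHead : List (List Char) → List (List Char)
  | [] => []
  | h :: t => (h ++ [';']) :: t

-- the loop body: `if len(line) > 0: … if indent < last_indent: … ; new_lines.append(line); last_indent = indent`
def pvStepA (s : Nat × List (List Char)) (line : List Char) : Nat × List (List Char) :=
  if line.length > 0 then
    let indent := pvIndentA line
    (indent, line :: (if indent < s.1 then pvBumpHead s.2 else s.2))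
  else s

def put_semicolon_last_indent (code : String) : String :=
  let st := (PySem.Chars.splitOn code.toList ['\n']).foldl pvStepA (0, [])
  match st.2 with
  | [] => ""   -- Python raises IndexError here (no non-empty line); excluded by Pre_
  | h :: t =>
    -- `if len(new_lines[-1]) > 0 and new_lines[-1][-1] != ";"`
    let h' := if h.length > 0 ∧ PySem.List.pyGet? h (-1) ≠ some ';' then h ++ [';'] else h
    String.mk (PySem.Chars.join ['\n'] ((h' :: t).reverse))

-- ===== PORT B =====

-- `len(l) - len(l.lstrip(" \t"))` (lstrip with an explicit char set, ported by hand: exact)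
def pvIndentB (l : List Char) : Nat :=
  l.length - (l.dropWhile (fun c => c == ' ' || c == '\t')).length

-- the reverse-loop body: below = indent of the line just below; out grows at the end
def pvStepB (s : Nat × List (List Char)) (line : List Char) : Nat × List (List Char) :=
  let ind := pvIndentB line
  (ind, s.2 ++ [if s.1 < ind then line ++ [';'] else line])

def put_semicolon_last_indent_alt (code : String) : String :=
  let lines := (PySem.Chars.splitOn code.toList ['\n']).filter (fun l => !l.isEmpty)
  match PySem.List.pop? lines with
  | none => ""   -- Python's lines.pop() raises IndexError here; excluded by Pre_
  | some (tail, front) =>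
    let out0 := [if PySem.Chars.endswith tail [';'] then tail else tail ++ [';']]
    let st := front.reverse.foldl pvStepB (pvIndentB tail, out0)
    String.mk (PySem.Chars.join ['\n'] st.2.reverse)

-- ===== PRECONDITION & SPEC =====
-- A indexes new_lines[-1] (and B pops lines[-1]): both raise IndexError when the
-- input has no non-empty line; exactly those inputs are excluded.
def Pre_put_semicolon_last_indent (code : String) : Prop :=
  ((PySem.Chars.splitOn code.toList ['\n']).any (fun l => !l.isEmpty)) = true
instance (code : String) : Decidable (Pre_put_semicolon_last_indent code) := by
  unfold Pre_put_semicolon_last_indent; infer_instance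

def pvWitness_put_semicolon_last_indent : String := "if x:\n    y = 1\nreturn y"

def Spec_put_semicolon_last_indent (code : String) (out : String) : Prop := out = put_semicolon_last_indent_alt code
instance (code : String) (out : String) : Decidable (Spec_put_semicolon_last_indent code out) := by unfold Spec_put_semicolon_last_indent; infer_instance

-- ===== CLAIM (what is proved, stated in full; the proofs are below) =====
def Claim_equal_put_semicolon_last_indent : Prop := ∀ (code : String), Dom_put_semicolon_last_indent code → Pre_put_semicolon_last_indent code → Spec_put_semicolon_last_indent code (put_semicolon_last_indent code)

-- ===== LEMMAS AND PROOFS =====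

-- A's guarded fold = the unguarded core fold over the filtered lines
def pvCoreA (s : Nat × List (List Char)) (line : List Char) : Nat × List (List Char) :=
  (pvIndentA line, line :: (if pvIndentA line < s.1 then pvBumpHead s.2 else s.2))

theorem pvFoldA_filter (ls : List (List Char)) (s : Nat × List (List Char)) :
    ls.foldl pvStepA s = (ls.filter (fun l => !l.isEmpty)).foldl pvCoreA s := by
  induction ls generalizing s with
  | nil => rfl
  | cons x xs ih =>
    by_cases hx : x = []
    · subst hx; simpa [pvStepA] using ih s
    · have hlen : x.length > 0 := List.length_pos_iff.mpr hx
      simp [pvStepA, pvCoreA, hlen, List.isEmpty_eq_false_iff.mpr hx, ih]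

-- the adjusted non-last lines, one per line, decided by the NEXT line's indent
def pvFront : List (List Char) → List (List Char)
  | [] => []
  | [_] => []
  | x :: y :: rest =>
      (if pvIndentA y < pvIndentA x then x ++ [';'] else x) :: pvFront (y :: rest)

-- characterisation of A's forward fold: the emitted list (reversed) is
-- getLast :: (pvFront ls).reverse, i.e. pvFront ls ++ [getLast] in order
theorem pvFoldA_char (ls : List (List Char)) (h : ls ≠ []) :
    ∀ (i : Nat) (acc : List (List Char)),
    ls.foldl pvCoreA (i, acc) =
      (pvIndentA (ls.getLast h),
       (pvFront ls ++ [ls.getLast h]).reverse ++ (if pvIndentA (ls.head h) < i then pvBumpHead acc else acc)) := by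
  induction ls with
  | nil => exact absurd rfl h
  | cons x xs ih =>
    intro i acc
    cases xs with
    | nil => simp [pvCoreA, pvFront]
    | cons y rest =>
      have hne : y :: rest ≠ [] := by simp
      simp only [List.foldl_cons, pvCoreA, ih hne]
      simp [pvFront, List.getLast, pvBumpHead]
      split_ifs <;> simp [pvBumpHead]

theorem pvIndentB_eq (l : List Char) : pvIndentB l = pvIndentA l := by
  induction l with
  | nil => rfl
  | cons c cs ih =>
    by_cases hc : c = ' ' ∨ c = '\t'
    · have hb : (c == ' ' || c == '\t') = true := by
        rcases hc with h | h <;> simp [h]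
      have hle : (cs.dropWhile (fun c => c == ' ' || c == '\t')).length ≤ cs.length :=
        List.length_dropWhile_le _ _
      simp [pvIndentB, pvIndentA, List.dropWhile_cons, hb, hc] at *
      omega
    · have hb : (c == ' ' || c == '\t') = false := by
        push_neg at hc; simp [hc.1, hc.2]
      simp [pvIndentB, pvIndentA, List.dropWhile_cons, hb, hc]

-- characterisation of B's reverse fold
theorem pvFoldB_char (ls : List (List Char)) (h : ls ≠ []) :
    ∀ (acc : List (List Char)),
    (ls.dropLast.reverse).foldl pvStepB (pvIndentA (ls.getLast h), acc) =
      (pvIndentA (ls.head h), acc ++ (pvFront ls).reverse) := by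
  induction ls with
  | nil => exact absurd rfl h
  | cons x xs ih =>
    intro acc
    cases xs with
    | nil => simp [pvFront]
    | cons y rest =>
      have hne : y :: rest ≠ [] := by simp
      have hdl : (x :: y :: rest).dropLast = x :: (y :: rest).dropLast := by
        simp [List.dropLast]
      rw [hdl, List.reverse_cons, List.foldl_append]
      have hgl : (x :: y :: rest).getLast (by simp) = (y :: rest).getLast hne := by
        simp [List.getLast]
      rw [hgl, ih hne acc]
      simp [pvStepB, pvFront, pvIndentB_eq]

theorem pvEndswith_singleton (l : List Char) (x : Char) :
    PySem.Chars.endswith l [x] = true ↔ l.getLast? = some x := by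
  rw [PySem.Chars.endswith_iff]
  constructor
  · rintro ⟨t, rfl⟩; simp
  · intro hx
    have hne : l ≠ [] := by rintro rfl; simp at hx
    have hg : l.getLast hne = x := by
      rw [List.getLast?_eq_getLast hne] at hx; exact Option.some_injective _ hx
    exact ⟨l.dropLast, by rw [← hg]; exact List.dropLast_append_getLast hne⟩

-- ===== VERDICT (by name: the statement is the Claim_ definition above) =====
theorem put_semicolon_last_indent_spec : Claim_equal_put_semicolon_last_indent := by
  intro code _ hpre
  unfold Spec_put_semicolon_last_indent put_semicolon_last_indent put_semicolon_last_indent_alt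
  rw [pvFoldA_filter]
  set lines := (PySem.Chars.splitOn code.toList ['\n']).filter (fun l => !l.isEmpty) with hlines
  have hne : lines ≠ [] := by
    unfold Pre_put_semicolon_last_indent at hpre
    simp only [List.any_eq_true] at hpre
    obtain ⟨l, hl, hl2⟩ := hpre
    intro hcon
    have : l ∈ lines := by simp [hlines, List.mem_filter, hl, hl2]
    simp [hcon] at this
  set L := lines.getLast hne with hL
  have hLne : L ≠ [] := by
    have hmem : L ∈ lines := by rw [hL]; exact List.getLast_mem hne
    rw [hlines, List.mem_filter] at hmem
    simpa using hmem.2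
  have hsplit : lines = lines.dropLast ++ [L] := (List.dropLast_append_getLast hne).symm
  have hpop : PySem.List.pop? lines = some (L, lines.dropLast) := by
    conv_lhs => rw [hsplit]
    exact PySem.List.pop?_last _ _
  rw [pvFoldA_char lines hne 0 []]
  simp only [hpop, Nat.not_lt_zero, if_false, List.append_nil, List.reverse_append,
    List.reverse_cons, List.reverse_nil, List.nil_append, List.cons_append]
  have hlen : L.length > 0 := List.length_pos_iff.mpr hLne
  have hend := pvEndswith_singleton L ';'
  have hfix : (if PySem.Chars.endswith L [';'] then L else L ++ [';']) =
      (if L.length > 0 ∧ PySem.List.pyGet? L (-1) ≠ some ';' then L ++ [';'] else L) := by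
    by_cases hsc : L.getLast? = some ';'
    · simp [hend.mpr hsc, hsc, hlen, PySem.List.pyGet?_neg_one]
    · have hE : PySem.Chars.endswith L [';'] = false := by
        rw [Bool.eq_false_iff]; intro hc; exact hsc (hend.mp hc)
      simp [hE, hsc, hlen, PySem.List.pyGet?_neg_one]
  rw [pvIndentB_eq, hL, pvFoldB_char lines hne]
  simp [hfix, List.reverse_append, ← hL]
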